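-- pv_equiv track=rewrite | github.com/zhuxinzhou/python_algo | search/bsearch.py | bsearch_left_not_less
-- ===== SOURCE A (Python) =====
-- from typing import List
--
-- def bsearch_left_not_less(nums: List[int], target: int) -> int:
--     """Binary search of the index of the first element
--     not less than a given target in the ascending sorted array.
--     If not found, return -1.
--     """
--     low, high = 0, len(nums) - 1
--     while low <= high:
--         mid = low + (high - low) // 2
--         if nums[mid] < target:
--             low = mid + 1
--         else:
--             high = mid - 1
--     if low < len(nums) and nums[low] >= target:
--         return low
--     else:
--         return -1
-- ===== SOURCE B (Python) =====
-- def _ins(seg, target):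
--     """Insertion point of target in seg (first index whose element is not
--     less than target), by physically splitting the list at its midpoint."""
--     if not seg:
--         return 0
--     k = (len(seg) - 1) // 2
--     if seg[k] < target:
--         return k + 1 + _ins(seg[k + 1:], target)
--     return _ins(seg[:k], target)
--
--
-- def bsearch_left_not_less(nums, target):
--     i = _ins(nums, target)
--     if i < len(nums) and nums[i] >= target:
--         return i
--     return -1
-- ===== Notes on version B (the rewrite author's own statement) =====
-- stated objective: alternative
-- what changed: A's imperative low/high index loop over the whole array is replaced by a structural recursion that physically splits the list: it probes the midpoint element and recurses on the slice seg[k+1:] or seg[:k], accumulating the offset, so no index window is maintained at all; the wrapper validates the resulting insertion point.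
import Mathlib
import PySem

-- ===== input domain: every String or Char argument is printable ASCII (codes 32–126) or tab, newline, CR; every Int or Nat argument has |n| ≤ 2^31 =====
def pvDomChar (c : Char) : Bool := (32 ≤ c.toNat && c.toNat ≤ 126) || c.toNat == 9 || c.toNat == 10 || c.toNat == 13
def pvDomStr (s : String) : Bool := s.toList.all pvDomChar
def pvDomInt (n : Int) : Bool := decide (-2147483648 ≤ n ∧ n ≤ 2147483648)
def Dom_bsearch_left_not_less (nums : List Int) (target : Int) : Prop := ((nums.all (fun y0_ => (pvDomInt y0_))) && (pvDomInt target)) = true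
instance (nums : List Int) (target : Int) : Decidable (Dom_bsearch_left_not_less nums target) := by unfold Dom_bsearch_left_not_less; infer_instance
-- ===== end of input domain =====

-- B replaces A's imperative low/high index loop by a structural recursion that physically
-- splits the list at its midpoint (same probe sequence, alternative decomposition, same cost).

-- ===== PORT A =====
-- A's while-loop over the inclusive pair (low, high); the `none` arm of the list access is
-- unreachable for the loop's actual calls (mid always lies in [0, len)) and stands for the
-- IndexError Python would raise there.
def pvALoop (nums : List Int) (target : Int) (low high : Int) : Int :=
  if _h : low ≤ high then
    let mid := low + PySem.Int.floordiv (high - low) 2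
    match PySem.List.pyGet? nums mid with
    | some v => if v < target then pvALoop nums target (mid + 1) high
                else pvALoop nums target low (mid - 1)
    | none => 0
  else
    low
termination_by (high + 1 - low).toNat
decreasing_by
  · have hb := PySem.Int.floordiv_two_mid_bounds (lo := 0) (hi := high - low) (by omega)
    rw [show (0 : Int) + (high - low) = high - low by ring] at hb
    omega
  · have hb := PySem.Int.floordiv_two_mid_bounds (lo := 0) (hi := high - low) (by omega)
    rw [show (0 : Int) + (high - low) = high - low by ring] at hb
    omega

def bsearch_left_not_less (nums : List Int) (target : Int) : Int :=
  let low := pvALoop nums target 0 ((nums.length : Int) - 1)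
  if low < (nums.length : Int) then
    match PySem.List.pyGet? nums low with
    | some v => if v ≥ target then low else -1
    | none => -1
  else -1

-- ===== PORT B =====
-- Source B's `_ins`: structural recursion on ever-shorter sublists obtained by Python slicing;
-- the `none` arm is the same unreachable IndexError stand-in.
def pvIns (seg : List Int) (target : Int) : Int :=
  if _h : seg.isEmpty then 0
  else
    let k := PySem.Int.floordiv ((seg.length : Int) - 1) 2
    match PySem.List.pyGet? seg k with
    | some v =>
        if v < target then k + 1 + pvIns (PySem.List.slice seg (some (k + 1)) none) target
        else pvIns (PySem.List.slice seg none (some k)) target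
    | none => 0
termination_by seg.length
decreasing_by
  all_goals
    have hlen : 0 < seg.length := by
      rcases seg with _ | ⟨a, s⟩
      · simp at _h
      · simp
  all_goals
    have hb := PySem.Int.floordiv_two_mid_bounds (lo := 0) (hi := (seg.length : Int) - 1)
      (by omega)
  all_goals
    rw [show (0 : Int) + ((seg.length : Int) - 1) = (seg.length : Int) - 1 by ring] at hb
  · rw [PySem.List.slice_from seg
      (show (0 : Int) ≤ PySem.Int.floordiv ((seg.length : Int) - 1) 2 + 1 from by omega)]
    simp only [List.length_drop]
    omega
  · rw [PySem.List.slice_to seg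
      (show (0 : Int) ≤ PySem.Int.floordiv ((seg.length : Int) - 1) 2 from by omega)]
    simp only [List.length_take]
    omega

def bsearch_left_not_less_alt (nums : List Int) (target : Int) : Int :=
  let i := pvIns nums target
  if i < (nums.length : Int) then
    match PySem.List.pyGet? nums i with
    | some v => if v ≥ target then i else -1
    | none => -1
  else -1

-- ===== PRECONDITION & SPEC =====
def Spec_bsearch_left_not_less (nums : List Int) (target : Int) (out : Int) : Prop := out = bsearch_left_not_less_alt nums target
instance (nums : List Int) (target : Int) (out : Int) : Decidable (Spec_bsearch_left_not_less nums target out) := by unfold Spec_bsearch_left_not_less; infer_instance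

-- ===== CLAIM =====
def Claim_equal_bsearch_left_not_less : Prop := ∀ (nums : List Int) (target : Int), Dom_bsearch_left_not_less nums target → Spec_bsearch_left_not_less nums target (bsearch_left_not_less nums target)

-- ===== LEMMAS AND PROOFS =====

-- A's loop on the inclusive window (lo, hi) equals lo plus B's insertion point of the
-- physical sublist nums[lo : hi+1].
theorem pv_loop_eq_ins (nums : List Int) (target : Int) :
    ∀ (n : Nat) (lo hi : Int), 0 ≤ lo → hi < (nums.length : Int) → (hi + 1 - lo).toNat ≤ n →
      pvALoop nums target lo hi
        = lo + pvIns ((nums.drop lo.toNat).take (hi + 1 - lo).toNat) target := by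
  intro n
  induction n with
  | zero =>
    intro lo hi hlo hhi hn
    have hle : ¬ lo ≤ hi := by omega
    rw [pvALoop, dif_neg hle, show (hi + 1 - lo).toNat = 0 by omega]
    rw [pvIns]
    simp
  | succ n ih =>
    intro lo hi hlo hhi hn
    by_cases hle : lo ≤ hi
    · -- the window is nonempty; both sides probe the same midpoint element
      set m : Nat := (hi + 1 - lo).toNat with hm
      set seg : List Int := (nums.drop lo.toNat).take m with hseg
      have hseglen : seg.length = m := by
        simp only [hseg, List.length_take, List.length_drop]
        omega
      have hkb := PySem.Int.floordiv_two_mid_bounds (lo := 0) (hi := hi - lo) (by omega)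
      rw [show (0 : Int) + (hi - lo) = hi - lo by ring] at hkb
      set kk : Int := PySem.Int.floordiv (hi - lo) 2 with hkk
      have hksame : PySem.Int.floordiv ((seg.length : Int) - 1) 2 = kk := by
        rw [hkk]
        congr 1
        rw [hseglen]
        omega
      have hidx : (lo + kk).toNat < nums.length := by omega
      obtain ⟨v, hv⟩ : ∃ v, nums[(lo + kk).toNat]? = some v :=
        ⟨_, List.getElem?_eq_getElem hidx⟩
      have hgetA : PySem.List.pyGet? nums (lo + kk) = some v := by
        rw [show lo + kk = (((lo + kk).toNat : Nat) : Int) by omega, PySem.List.pyGet?_natCast]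
        exact hv
      have hgetB : PySem.List.pyGet? seg kk = some v := by
        rw [show kk = ((kk.toNat : Nat) : Int) by omega, PySem.List.pyGet?_natCast]
        rw [hseg, List.getElem?_take, if_pos (by omega), List.getElem?_drop,
          show lo.toNat + kk.toNat = (lo + kk).toNat by omega]
        exact hv
      have hne : ¬ seg.isEmpty = true := by
        rw [List.isEmpty_iff]
        intro hnil
        rw [hnil] at hseglen
        simp at hseglen
        omega
      rw [pvALoop, dif_pos hle, pvIns, dif_neg hne]
      rw [← hkk]
      simp only [hksame, hgetA, hgetB]
      by_cases hvt : v < target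
      · -- descend into the right half
        rw [if_pos hvt, if_pos hvt]
        rw [ih (lo + kk + 1) hi (by omega) hhi (by omega)]
        rw [PySem.List.slice_from seg (show (0 : Int) ≤ kk + 1 by omega)]
        rw [hseg, List.drop_take, List.drop_drop]
        rw [show lo.toNat + (kk + 1).toNat = (lo + kk + 1).toNat by omega,
          show m - (kk + 1).toNat = (hi + 1 - (lo + kk + 1)).toNat by omega]
        ring
      · -- descend into the left half
        rw [if_neg hvt, if_neg hvt]
        rw [ih lo (lo + kk - 1) hlo (by omega) (by omega)]
        rw [PySem.List.slice_to seg (show (0 : Int) ≤ kk by omega)]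
        rw [hseg, List.take_take, show min kk.toNat m = (lo + kk - 1 + 1 - lo).toNat by omega]
    · rw [pvALoop, dif_neg hle, show (hi + 1 - lo).toNat = 0 by omega]
      rw [pvIns]
      simp

-- ===== VERDICT =====
theorem bsearch_left_not_less_spec : Claim_equal_bsearch_left_not_less := by
  intro nums target _
  unfold Spec_bsearch_left_not_less bsearch_left_not_less bsearch_left_not_less_alt
  have h := pv_loop_eq_ins nums target ((nums.length : Int) - 1 + 1 - 0).toNat 0
      ((nums.length : Int) - 1) le_rfl (by omega) le_rfl
  simp only [show ((nums.length : Int) - 1 + 1 - 0).toNat = nums.length by omega,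
    Int.toNat_zero, List.drop_zero, List.take_length, zero_add] at h
  rw [h]
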